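-- pv_equiv track=rewrite | github.com/BabylooPro/Open-AutoTools | autotools/autotodo/core.py | _extract_task_lines_from_section
-- ===== SOURCE A (Python) =====
-- def _extract_task_lines_from_section(lines: list, start_idx: int, end_idx: int) -> list[str]:
--     section_lines = []
--     for i in range(start_idx + 1, min(end_idx, len(lines))):
--         line = lines[i]
--         stripped = line.strip()
--         if stripped == '' or stripped == '---': continue
--         if stripped.startswith('####') or (stripped.startswith('[') and ']:' in stripped): break
--         if stripped.startswith('-'): section_lines.append(stripped)
--     return section_lines
-- ===== SOURCE B (Python) =====
-- def _extract_task_lines_from_section(lines: list, start_idx: int, end_idx: int) -> list[str]: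
--     stripped = [lines[i].strip() for i in range(start_idx + 1, min(end_idx, len(lines)))]
--     cut = next((k for k, s in enumerate(stripped)
--                 if s.startswith('####') or (s.startswith('[') and ']:' in s)), len(stripped))
--     return [s for s in stripped[:cut] if s.startswith('-') and s != '---']
-- ===== Notes on version B (the rewrite author's own statement) =====
-- stated objective: alternative
-- what changed: Replaces the single loop with continue/break/append by three separated passes: map every in-range line to its strip(), locate the first section-boundary line with next(enumerate(...)), then one comprehension keeps the dash-prefixed lines before that cut (the '' and '---' lines drop out of the filter).
import Mathlib
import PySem

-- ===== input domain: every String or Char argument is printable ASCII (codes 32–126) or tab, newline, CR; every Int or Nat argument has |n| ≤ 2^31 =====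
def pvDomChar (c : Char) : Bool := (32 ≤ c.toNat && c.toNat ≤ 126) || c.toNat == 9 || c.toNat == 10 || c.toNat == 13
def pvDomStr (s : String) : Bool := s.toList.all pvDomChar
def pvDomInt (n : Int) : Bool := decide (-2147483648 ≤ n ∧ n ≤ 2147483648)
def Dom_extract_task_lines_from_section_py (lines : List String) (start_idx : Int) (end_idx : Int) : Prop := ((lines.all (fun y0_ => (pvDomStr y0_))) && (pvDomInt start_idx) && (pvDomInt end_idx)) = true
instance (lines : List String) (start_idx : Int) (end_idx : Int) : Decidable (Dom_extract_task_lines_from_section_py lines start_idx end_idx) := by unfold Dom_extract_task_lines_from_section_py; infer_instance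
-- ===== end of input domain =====

-- B separates the single continue/break/append loop into three passes (strip-map, find the
-- boundary cut, filter dash lines); alternative decomposition, same cost; return value only.

-- ===== PORT A =====
-- the for-loop of A: recursion over the index list, accumulator = section_lines
def pvALoop (lines : List String) : List Int → List String → List String
  | [], acc => acc
  | i :: is, acc =>
    match PySem.List.pyGet? lines i with
    | none => acc  -- IndexError (excluded by Pre_)
    | some line =>
      let stripped := PySem.Str.strip line
      if stripped = "" ∨ stripped = "---" then pvALoop lines is acc
      else if PySem.Str.startswith stripped "####"
              || (PySem.Str.startswith stripped "[" && PySem.Str.isIn "]:" stripped) then acc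
      else if PySem.Str.startswith stripped "-" then pvALoop lines is (acc ++ [stripped])
      else pvALoop lines is acc

def extract_task_lines_from_section_py (lines : List String) (start_idx : Int) (end_idx : Int) : List String :=
  pvALoop lines (PySem.List.pyRange (start_idx + 1) (min end_idx (lines.length : Int)) 1) []

-- ===== PORT B =====
def extract_task_lines_from_section_py_alt (lines : List String) (start_idx : Int) (end_idx : Int) : List String :=
  let stripped := (PySem.List.pyRange (start_idx + 1) (min end_idx (lines.length : Int)) 1).map
      (fun i => PySem.Str.strip ((PySem.List.pyGet? lines i).getD ""))
  let cut := (stripped.findIdx? (fun s => PySem.Str.startswith s "####"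
              || (PySem.Str.startswith s "[" && PySem.Str.isIn "]:" s))).getD stripped.length
  (stripped.take cut).filter (fun s => PySem.Str.startswith s "-" && s ≠ "---")

-- ===== PRECONDITION & SPEC =====
-- Pre_ excludes exactly the inputs where A raises IndexError: a nonempty index range whose
-- first index start_idx+1 is below -len(lines). (B raises there too.)
def Pre_extract_task_lines_from_section_py (lines : List String) (start_idx : Int) (end_idx : Int) : Prop :=
  start_idx + 1 < min end_idx (lines.length : Int) → -(lines.length : Int) ≤ start_idx + 1
instance (lines : List String) (start_idx : Int) (end_idx : Int) : Decidable (Pre_extract_task_lines_from_section_py lines start_idx end_idx) := by unfold Pre_extract_task_lines_from_section_py; infer_instance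

def pvWitness_extract_task_lines_from_section_py : List String × Int × Int := (["## To Do", "- task one", "", "- task two"], 0, 4)

def Spec_extract_task_lines_from_section_py (lines : List String) (start_idx : Int) (end_idx : Int) (out : List String) : Prop := out = extract_task_lines_from_section_py_alt lines start_idx end_idx
instance (lines : List String) (start_idx : Int) (end_idx : Int) (out : List String) : Decidable (Spec_extract_task_lines_from_section_py lines start_idx end_idx out) := by unfold Spec_extract_task_lines_from_section_py; infer_instance

-- ===== CLAIM (what is proved, stated in full; the proofs are below) =====
def Claim_equal_extract_task_lines_from_section_py : Prop := ∀ (lines : List String) (start_idx : Int) (end_idx : Int), Dom_extract_task_lines_from_section_py lines start_idx end_idx → Pre_extract_task_lines_from_section_py lines start_idx end_idx → Spec_extract_task_lines_from_section_py lines start_idx end_idx (extract_task_lines_from_section_py lines start_idx end_idx)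

-- ===== LEMMAS AND PROOFS =====

-- stripped[:cut] with cut = first boundary index (or len) is takeWhile (not boundary)
theorem pv_take_findIdx {α : Type} (p : α → Bool) (xs : List α) :
    xs.take ((xs.findIdx? p).getD xs.length) = xs.takeWhile (fun x => !p x) := by
  induction xs with
  | nil => simp
  | cons x xs ih =>
    by_cases hx : p x = true
    · simp [List.findIdx?_cons, hx]
    · simp only [List.findIdx?_cons, hx, if_neg, Bool.false_eq_true, not_false_eq_true,
        List.takeWhile_cons, Bool.not_eq_eq_eq_not, Bool.not_true]
      cases h : xs.findIdx? p with
      | none => simpa [h, eq_false_of_ne_true hx] using congrArg (List.cons x) (by simpa [h] using ih)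
      | some k => simpa [h, eq_false_of_ne_true hx] using congrArg (List.cons x) (by simpa [h] using ih)

-- main loop invariant: A's loop over a list of in-range indices equals
-- acc ++ (B's takeWhile/filter pipeline over the stripped strings of those indices)
theorem pvALoop_eq (lines : List String) (is : List Int)
    (h : ∀ i ∈ is, (PySem.List.pyGet? lines i).isSome) (acc : List String) :
    pvALoop lines is acc =
      acc ++ ((is.map (fun i => PySem.Str.strip ((PySem.List.pyGet? lines i).getD ""))).takeWhile
          (fun s => !(PySem.Str.startswith s "####"
              || (PySem.Str.startswith s "[" && PySem.Str.isIn "]:" s)))).filter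
        (fun s => PySem.Str.startswith s "-" && s ≠ "---") := by
  induction is generalizing acc with
  | nil => simp [pvALoop]
  | cons i is ih =>
    have hi : (PySem.List.pyGet? lines i).isSome := h i (by simp)
    obtain ⟨line, hline⟩ := Option.isSome_iff_exists.mp hi
    have hrest : ∀ j ∈ is, (PySem.List.pyGet? lines j).isSome := fun j hj => h j (by simp [hj])
    simp only [pvALoop, hline, List.map_cons, List.takeWhile_cons, Option.getD_some]
    by_cases h1 : PySem.Str.strip line = "" ∨ PySem.Str.strip line = "---"
    · -- continue: '' never starts with '-', '---' fails the ≠ '---' filter; neither is a boundary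
      rw [if_pos h1, ih hrest acc]
      rcases h1 with h1 | h1 <;> rw [h1]
      · have hP : (PySem.Str.startswith "" "####"
            || (PySem.Str.startswith "" "[" && PySem.Str.isIn "]:" "")) = false := by decide
        have hQ : (PySem.Str.startswith "" "-" && decide ("" ≠ "---")) = false := by decide
        simp only [hP, hQ, Bool.not_false, reduceIte, List.filter_cons, Bool.false_eq_true]
      · have hP : (PySem.Str.startswith "---" "####"
            || (PySem.Str.startswith "---" "[" && PySem.Str.isIn "]:" "---")) = false := by decide
        have hQ : (PySem.Str.startswith "---" "-" && decide ("---" ≠ "---")) = false := by decide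
        simp only [hP, hQ, Bool.not_false, reduceIte, List.filter_cons, Bool.false_eq_true]
    · rw [if_neg h1]
      rw [not_or] at h1
      by_cases h2 : (PySem.Str.startswith (PySem.Str.strip line) "####"
          || (PySem.Str.startswith (PySem.Str.strip line) "["
              && PySem.Str.isIn "]:" (PySem.Str.strip line))) = true
      · -- break: takeWhile stops here, nothing more is appended
        rw [if_pos h2]
        simp only [h2, Bool.not_true, Bool.false_eq_true, reduceIte, List.filter_nil,
          List.append_nil]
      · rw [if_neg h2]
        have hP := eq_false_of_ne_true h2
        simp only [hP, Bool.not_false, reduceIte, List.filter_cons]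
        by_cases h3 : PySem.Str.startswith (PySem.Str.strip line) "-" = true
        · -- append the dash line
          rw [if_pos h3, ih hrest (acc ++ [PySem.Str.strip line])]
          have hQ : (PySem.Str.startswith (PySem.Str.strip line) "-"
              && decide (PySem.Str.strip line ≠ "---")) = true := by
            simp only [h3, Bool.true_and, decide_eq_true_eq]; exact h1.2
          simp only [hQ, reduceIte, List.append_assoc, List.singleton_append]
        · rw [if_neg h3, ih hrest acc]
          simp only [eq_false_of_ne_true h3, Bool.false_and, Bool.false_eq_true, reduceIte]

-- ===== VERDICT (by name: the statement is the Claim_ definition above) =====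
theorem extract_task_lines_from_section_py_spec : Claim_equal_extract_task_lines_from_section_py := by
  intro lines start_idx end_idx _hdom hpre
  unfold Spec_extract_task_lines_from_section_py
  simp only [extract_task_lines_from_section_py, extract_task_lines_from_section_py_alt]
  rw [pv_take_findIdx]
  have h : ∀ i ∈ PySem.List.pyRange (start_idx + 1) (min end_idx (lines.length : Int)) 1,
      (PySem.List.pyGet? lines i).isSome := by
    intro i hi
    rw [PySem.List.mem_pyRange_one] at hi
    have := hpre (lt_of_le_of_lt hi.1 hi.2)
    rw [Option.isSome_iff_ne_none]
    intro hnone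
    rw [PySem.List.pyGet?_eq_none_iff] at hnone
    exact hnone ⟨by omega, by omega⟩
  simpa using pvALoop_eq lines _ h []
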